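-- pv_equiv track=rewrite | github.com/lindsayjgc/investiCAT | cedar/summary_generator.py | _generate_follow_up_leads
-- ===== SOURCE A (Python) =====
-- from typing import Dict, List, Any, Optional
--
-- def _generate_follow_up_leads(timeline_data: List[Dict]) -> List[str]:
--     """Generate follow-up investigation leads."""
--     leads = []
--
--     # Entities that appear frequently
--     entities = {}
--     for event in timeline_data:
--         entity = event.get('entity')
--         if entity:
--             entities[entity] = entities.get(entity, 0) + 1
--
--     top_entities = sorted(entities.items(), key=lambda x: x[1], reverse=True)[:3]
--     for entity, count in top_entities:
--         leads.append(f"Interview {entity} (mentioned {count} times)")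
--
--     # Gaps in timeline
--     dates = sorted([event.get('date') for event in timeline_data if event.get('date')])
--     if len(dates) > 1:
--         leads.append(f"Investigate gap between {dates[0]} and {dates[-1]}")
--
--     return leads[:5]
-- ===== SOURCE B (Python) =====
-- def _generate_follow_up_leads(timeline_data):
--     """Generate follow-up investigation leads (selection instead of sorting)."""
--     counts = {}
--     for event in timeline_data:
--         entity = event.get('entity')
--         if entity:
--             counts[entity] = counts.get(entity, 0) + 1
--
--     leads = []
--     items = list(counts.items())
--     # Pick the 3 most frequent entities by repeated first-argmax extraction
--     # (same order as a stable reverse sort) instead of sorting everything.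
--     for _ in range(3):
--         if not items:
--             break
--         best = max(items, key=lambda x: x[1])
--         items.remove(best)
--         leads.append(f"Interview {best[0]} (mentioned {best[1]} times)")
--
--     dates = [event.get('date') for event in timeline_data if event.get('date')]
--     if len(dates) > 1:
--         leads.append(f"Investigate gap between {min(dates)} and {max(dates)}")
--
--     return leads
-- ===== Notes on version B (the rewrite author's own statement) =====
-- stated objective: alternative
-- what changed: Selects the top-3 entities by three rounds of first-argmax extraction instead of reverse-sorting all entity counts and slicing, and computes the timeline gap with min()/max() over the dates instead of sorting them and indexing [0]/[-1].
import Mathlib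
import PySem

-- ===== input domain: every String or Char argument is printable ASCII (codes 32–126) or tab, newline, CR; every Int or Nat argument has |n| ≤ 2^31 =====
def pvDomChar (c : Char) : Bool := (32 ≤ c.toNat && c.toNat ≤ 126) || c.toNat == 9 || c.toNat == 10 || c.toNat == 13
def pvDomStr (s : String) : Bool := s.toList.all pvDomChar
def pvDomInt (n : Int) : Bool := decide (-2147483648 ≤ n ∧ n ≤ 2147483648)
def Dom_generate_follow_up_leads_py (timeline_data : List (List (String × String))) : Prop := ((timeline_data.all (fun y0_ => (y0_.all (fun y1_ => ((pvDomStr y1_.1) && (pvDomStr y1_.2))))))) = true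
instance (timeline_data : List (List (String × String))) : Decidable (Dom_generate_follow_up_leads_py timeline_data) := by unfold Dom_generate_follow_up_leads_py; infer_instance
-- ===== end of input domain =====

-- B replaces the full reverse-sort-and-slice of the entity counts by three rounds of
-- first-argmax extraction, and the sort of the dates by min/max; same return value.

-- ===== PORT A =====
-- shared helpers: the counting loop, the date comprehension and the f-string are
-- literally identical lines in A and B, so both ports use these transliterations
def pvFmtLead (p : String × Int) : String :=
  "Interview " ++ p.1 ++ " (mentioned " ++ PySem.Int.toStr p.2 ++ " times)"

def pvCounts (timeline_data : List (List (String × String))) : PySem.Dict String Int :=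
  timeline_data.foldl (fun d event =>
    match (PySem.Dict.mk event).get? "entity" with
    | some e => if e ≠ "" then d.insert e (d.getD e 0 + 1) else d
    | none => d) PySem.Dict.empty

def pvDates (timeline_data : List (List (String × String))) : List String :=
  timeline_data.filterMap (fun event =>
    match (PySem.Dict.mk event).get? "date" with
    | some dt => if dt ≠ "" then some dt else none
    | none => none)

def generate_follow_up_leads_py (timeline_data : List (List (String × String))) : List String :=
  let entities := pvCounts timeline_data
  let top_entities := PySem.List.slice (PySem.List.sorted entities.items (fun x => x.2) true) none (some 3)
  let leads := top_entities.foldl (fun leads p => leads ++ [pvFmtLead p]) []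
  let dates := PySem.List.sorted (pvDates timeline_data) (fun x => x) false
  let leads := if 1 < dates.length then
      leads ++ ["Investigate gap between " ++ ((PySem.List.pyGet? dates 0).getD "") ++
                " and " ++ ((PySem.List.pyGet? dates (-1)).getD "")]
    else leads
  PySem.List.slice leads none (some 5)

-- ===== PORT B =====
def pvSelectTop : Nat → List (String × Int) → List String
  | 0, _ => []
  | _ + 1, [] => []
  | n + 1, x :: rest =>
      match PySem.List.max? (x :: rest) (fun p => p.2) with
      | none => []
      | some best =>
          pvFmtLead best :: pvSelectTop n ((PySem.List.remove? (x :: rest) best).getD [])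

def generate_follow_up_leads_py_alt (timeline_data : List (List (String × String))) : List String :=
  let counts := pvCounts timeline_data
  let leads := pvSelectTop 3 counts.items
  let dates := pvDates timeline_data
  if 1 < dates.length then
    leads ++ ["Investigate gap between " ++ ((PySem.List.min? dates (fun x => x)).getD "") ++
              " and " ++ ((PySem.List.max? dates (fun x => x)).getD "")]
  else leads

-- ===== PRECONDITION & SPEC =====
def Spec_generate_follow_up_leads_py (timeline_data : List (List (String × String))) (out : List String) : Prop := out = generate_follow_up_leads_py_alt timeline_data
instance (timeline_data : List (List (String × String))) (out : List String) : Decidable (Spec_generate_follow_up_leads_py timeline_data out) := by unfold Spec_generate_follow_up_leads_py; infer_instance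

-- ===== CLAIM (what is proved, stated in full; the proofs are below) =====
def Claim_equal_generate_follow_up_leads_py : Prop := ∀ (timeline_data : List (List (String × String))), Dom_generate_follow_up_leads_py timeline_data → Spec_generate_follow_up_leads_py timeline_data (generate_follow_up_leads_py timeline_data)

-- ===== LEMMAS AND PROOFS =====

-- insertBy on a cons, unfolded
theorem pv_insertBy_cons {α : Type} (before : α → α → Bool) (x y : α) (ys : List α) :
    PySem.List.insertBy before x (y :: ys) =
      if before x y then x :: y :: ys else y :: PySem.List.insertBy before x ys := rfl

-- stable reverse sort appends on the right via one insertion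
theorem pv_sorted_rev_snoc {α κ : Type} [LinearOrder κ] (xs : List α) (x : α) (key : α → κ) :
    PySem.List.sorted (xs ++ [x]) key true =
      PySem.List.insertBy (fun a b => decide (key b < key a)) x (PySem.List.sorted xs key true) := by
  rw [PySem.List.sorted_rev_eq_foldl_insertBy, PySem.List.sorted_rev_eq_foldl_insertBy,
    List.foldl_append]
  rfl

theorem pv_max?_snoc {α κ : Type} [LinearOrder κ] (xs : List α) (x : α) (key : α → κ) :
    PySem.List.max? (xs ++ [x]) key =
      match PySem.List.max? xs key with
      | none => some x
      | some m => if key m < key x then some x else some m := by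
  unfold PySem.List.max?
  rw [List.foldl_append]
  cases h : List.foldl (fun acc x =>
      match acc with
      | none => some x
      | some m => if key m < key x then some x else some m) none xs <;> rfl

-- head of the stable reverse sort is the FIRST maximum, and the tail is the
-- stable reverse sort of the list with that occurrence erased
theorem pv_sorted_rev_cons_max {α κ : Type} [BEq α] [LawfulBEq α] [LinearOrder κ]
    (xs : List α) (key : α → κ) (m : α) (h : PySem.List.max? xs key = some m) :
    PySem.List.sorted xs key true = m :: PySem.List.sorted (xs.erase m) key true := by
  induction xs using List.reverseRecOn generalizing m with
  | nil => simp [PySem.List.max?] at h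
  | append_singleton xs x ih =>
      rw [pv_max?_snoc] at h
      cases h0 : PySem.List.max? xs key with
      | none =>
          have hxs : xs = [] := (PySem.List.max?_eq_none_iff xs key).mp h0
          rw [h0] at h
          simp at h
          subst hxs; subst h
          simp [PySem.List.sorted, PySem.List.insertBy]
      | some m0 =>
          rw [h0] at h
          simp only at h
          have hm0mem := PySem.List.max?_mem h0
          have hm0max := PySem.List.max?_isMax h0
          by_cases hlt : key m0 < key x
          · rw [if_pos hlt] at h
            have hmx : m = x := by injection h with h'; exact h'.symm
            subst hmx
            have hnotin : m ∉ xs := fun hin => absurd hlt (not_lt.mpr (hm0max m hin))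
            rw [List.erase_append_right _ hnotin]
            simp only [List.erase_cons_head]
            rw [pv_sorted_rev_snoc, ih m0 h0, pv_insertBy_cons, if_pos (by simpa using hlt),
              ← ih m0 h0]
            simp
          · rw [if_neg hlt] at h
            have hmm0 : m = m0 := by injection h with h'; exact h'.symm
            subst hmm0
            rw [List.erase_append_left _ hm0mem]
            rw [pv_sorted_rev_snoc, ih m h0, pv_insertBy_cons, if_neg (by simpa using hlt),
              pv_sorted_rev_snoc]

-- three rounds of first-argmax extraction = take 3 of the stable reverse sort
theorem pv_selectTop_eq (n : Nat) (items : List (String × Int)) :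
    pvSelectTop n items =
      ((PySem.List.sorted items (fun p => p.2) true).take n).map pvFmtLead := by
  induction n generalizing items with
  | zero => simp [pvSelectTop]
  | succ n ih =>
      cases items with
      | nil => simp [pvSelectTop, PySem.List.sorted]
      | cons x rest =>
          cases h : PySem.List.max? (x :: rest) (fun p => p.2) with
          | none => simp [PySem.List.max?_eq_none_iff] at h
          | some best =>
              have hmem := PySem.List.max?_mem h
              rw [pvSelectTop, h]
              simp only
              rw [PySem.List.remove?_eq_some_erase _ _ hmem, Option.getD_some,
                pv_sorted_rev_cons_max _ _ _ h, List.take_succ_cons, List.map_cons, ih]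

-- endpoints of the (forward) sorted dates are min and max
theorem pv_sorted_head_eq_min {α : Type} [LinearOrder α] (ds : List α) (d : α) (t : List α)
    (h : PySem.List.sorted ds (fun x => x) false = d :: t) :
    PySem.List.min? ds (fun x => x) = some d := by
  cases hm : PySem.List.min? ds (fun x => x) with
  | none =>
      rw [PySem.List.min?_eq_none_iff] at hm
      rw [hm] at h; simp [PySem.List.sorted] at h
  | some m =>
      have hmmem : m ∈ ds := PySem.List.min?_mem hm
      have hdm : d ≤ m := PySem.List.key_head_sorted_le ds (fun x => x) h m hmmem
      have hdmem : d ∈ ds := by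
        rw [← PySem.List.mem_sorted ds (fun x => x) false, h]; exact List.mem_cons_self
      have hmd : m ≤ d := PySem.List.min?_isMin hm d hdmem
      rw [le_antisymm hdm hmd]

theorem pv_sorted_getLast_eq_max {α : Type} [LinearOrder α] (ds : List α)
    (hne : PySem.List.sorted ds (fun x => x) false ≠ []) :
    PySem.List.max? ds (fun x => x) =
      some ((PySem.List.sorted ds (fun x => x) false).getLast hne) := by
  have hlast_mem : (PySem.List.sorted ds (fun x => x) false).getLast hne ∈ ds := by
    rw [← PySem.List.mem_sorted ds (fun x => x) false]; exact List.getLast_mem hne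
  cases hm : PySem.List.max? ds (fun x => x) with
  | none =>
      rw [PySem.List.max?_eq_none_iff] at hm
      rw [hm] at hne; simp [PySem.List.sorted] at hne
  | some M =>
      have hMmem : M ∈ PySem.List.sorted ds (fun x => x) false := by
        rw [PySem.List.mem_sorted]; exact PySem.List.max?_mem hm
      obtain ⟨p, hp, hpM⟩ := List.mem_iff_getElem.mp hMmem
      have hlen : 0 < (PySem.List.sorted ds (fun x => x) false).length :=
        List.length_pos_iff.mpr hne
      have hMle : M ≤ (PySem.List.sorted ds (fun x => x) false).getLast hne := by
        rw [List.getLast_eq_getElem]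
        calc M = (PySem.List.sorted ds (fun x => x) false)[p] := hpM.symm
          _ ≤ _ := PySem.List.key_sorted_getElem_mono ds (fun x => x) (by omega) (by omega)
      have hleM : (PySem.List.sorted ds (fun x => x) false).getLast hne ≤ M :=
        PySem.List.max?_isMax hm _ hlast_mem
      rw [le_antisymm hMle hleM]

-- the append-one-by-one loop over the top entities is a map
theorem pv_foldl_append_map {α β : Type} (f : α → β) (l : List α) (acc : List β) :
    l.foldl (fun a p => a ++ [f p]) acc = acc ++ l.map f := by
  induction l generalizing acc with
  | nil => simp
  | cons x t ih => simp [ih, List.append_assoc]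

theorem pv_pyGet_zero {α : Type} (ds : List α) : PySem.List.pyGet? ds 0 = ds.head? := by
  have h0 : PySem.List.pyGet? ds ((0 : Nat) : Int) = ds[0]? := PySem.List.pyGet?_natCast ds 0
  rw [List.head?_eq_getElem?]
  simpa using h0

theorem pv_pyGet_neg_one {α : Type} (ds : List α) (h : ds ≠ []) :
    PySem.List.pyGet? ds (-1) = some (ds.getLast h) := by
  have hl : 1 ≤ ds.length := List.length_pos_iff.mpr h
  have h1 : PySem.List.pyIdx? ds.length (-1) = some (ds.length - 1) := by
    simp [PySem.List.pyIdx?]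
    omega
  simp only [PySem.List.pyGet?, h1, Option.bind_some]
  rw [← List.getLast?_eq_getElem?, List.getLast?_eq_some_getLast h]

-- ===== VERDICT (by name: the statement is the Claim_ definition above) =====
theorem generate_follow_up_leads_py_spec : Claim_equal_generate_follow_up_leads_py := by
  intro td _
  unfold Spec_generate_follow_up_leads_py generate_follow_up_leads_py generate_follow_up_leads_py_alt
  simp only [PySem.List.slice_to _ (by norm_num : (0:Int) ≤ 3),
    PySem.List.slice_to _ (by norm_num : (0:Int) ≤ 5),
    show (3:Int).toNat = 3 from rfl, show (5:Int).toNat = 5 from rfl]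
  rw [pv_foldl_append_map, pv_selectTop_eq, List.nil_append]
  set L := List.map pvFmtLead
      (List.take 3 (PySem.List.sorted (pvCounts td).items (fun p => p.2) true)) with hL
  have hLlen : L.length ≤ 3 := by
    rw [hL, List.length_map]
    exact le_trans (List.length_take_le 3 _) (le_refl 3)
  rw [PySem.List.length_sorted]
  by_cases hgt : 1 < (pvDates td).length
  · rw [if_pos hgt, if_pos hgt]
    have hne : PySem.List.sorted (pvDates td) (fun x => x) false ≠ [] := by
      rw [Ne, PySem.List.sorted_eq_nil_iff]
      intro h0; rw [h0] at hgt; simp at hgt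
    obtain ⟨d, t, hdt⟩ := List.exists_cons_of_ne_nil hne
    have e1 : (PySem.List.pyGet? (PySem.List.sorted (pvDates td) (fun x => x) false) 0).getD ""
        = (PySem.List.min? (pvDates td) (fun x => x)).getD "" := by
      rw [pv_pyGet_zero, hdt, pv_sorted_head_eq_min (pvDates td) d t hdt]
      rfl
    have e2 : (PySem.List.pyGet? (PySem.List.sorted (pvDates td) (fun x => x) false) (-1)).getD ""
        = (PySem.List.max? (pvDates td) (fun x => x)).getD "" := by
      rw [pv_pyGet_neg_one _ hne, ← pv_sorted_getLast_eq_max (pvDates td) hne]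
    rw [e1, e2]
    exact List.take_of_length_le (by simp; omega)
  · rw [if_neg hgt, if_neg hgt]
    exact List.take_of_length_le (by omega)
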